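-- pv_equiv track=rewrite | github.com/aherbert/Omero-Screen-Napari | src/omero_screen_napari/omero_api.py | find_relevant_file_index
-- ===== SOURCE A (Python) =====
-- def find_relevant_file_index(file_names):
--     # First, try to find a file ending with 'final_data_cc.csv'
--     for index, file_name in enumerate(file_names):
--         if file_name.endswith("final_data_cc.csv"):
--             return index
--
--     # If not found, look for a file ending with 'final_data.csv'
--     for index, file_name in enumerate(file_names):
--         if file_name.endswith("final_data.csv"):
--             return index
--
--     # If neither type of file is found, raise an exception
--     raise ValueError("No final analysis CSV data found for the current plate.")
-- ===== SOURCE B (Python) =====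
-- def find_relevant_file_index(file_names):
--     fallback = None
--     for index, file_name in enumerate(file_names):
--         if file_name.endswith("final_data_cc.csv"):
--             return index
--         if fallback is None and file_name.endswith("final_data.csv"):
--             fallback = index
--     if fallback is not None:
--         return fallback
--     raise ValueError("No final analysis CSV data found for the current plate.")
-- ===== Notes on version B (the rewrite author's own statement) =====
-- stated objective: simpler
-- what changed: Replace A's two sequential enumerate scans with one pass that returns immediately on a 'final_data_cc.csv' match and records the first 'final_data.csv' index as a fallback returned only after the whole list was scanned.
import Mathlib
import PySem

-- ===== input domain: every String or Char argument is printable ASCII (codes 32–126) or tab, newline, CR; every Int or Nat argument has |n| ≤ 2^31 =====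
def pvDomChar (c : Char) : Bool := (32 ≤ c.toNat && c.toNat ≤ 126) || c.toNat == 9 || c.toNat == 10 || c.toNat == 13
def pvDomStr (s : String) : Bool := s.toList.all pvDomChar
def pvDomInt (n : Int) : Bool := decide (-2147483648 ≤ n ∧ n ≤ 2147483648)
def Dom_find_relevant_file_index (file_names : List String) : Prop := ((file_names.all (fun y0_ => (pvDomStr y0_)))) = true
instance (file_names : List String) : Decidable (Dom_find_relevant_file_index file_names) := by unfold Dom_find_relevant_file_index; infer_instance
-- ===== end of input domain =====

-- B merges A's two sequential scans into one pass with a recorded fallback index; objective: simpler.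
-- On inputs with no matching file both Pythons raise ValueError; those inputs are outside Pre_.

-- ===== PORT A =====
-- first loop of A: scan for a name ending with "final_data_cc.csv", from index i
def pvScanCC (file_names : List String) (i : Int) : Option Int :=
  match file_names with
  | [] => none
  | f :: rest =>
      if PySem.Str.endswith f "final_data_cc.csv" then some i else pvScanCC rest (i + 1)

-- second loop of A: scan for a name ending with "final_data.csv", from index i
def pvScanFD (file_names : List String) (i : Int) : Option Int :=
  match file_names with
  | [] => none
  | f :: rest =>
      if PySem.Str.endswith f "final_data.csv" then some i else pvScanFD rest (i + 1)

def find_relevant_file_index (file_names : List String) : Int :=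
  match pvScanCC file_names 0 with
  | some j => j
  | none =>
      match pvScanFD file_names 0 with
      | some j => j
      | none => 0   -- Python raises ValueError here; excluded by Pre_

-- ===== PORT B =====
-- B's single loop: return on cc match, record first plain match as fallback
def pvBLoop (file_names : List String) (i : Int) (fb : Option Int) : Int :=
  match file_names with
  | [] =>
      match fb with
      | some k => k
      | none => 0   -- Python raises ValueError here; excluded by Pre_
  | f :: rest =>
      if PySem.Str.endswith f "final_data_cc.csv" then i
      else pvBLoop rest (i + 1)
        (if fb = none ∧ PySem.Str.endswith f "final_data.csv" then some i else fb)

def find_relevant_file_index_alt (file_names : List String) : Int :=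
  pvBLoop file_names 0 none

-- ===== PRECONDITION & SPEC =====
-- Pre_ excludes exactly the inputs with no name ending in either suffix, on which A raises ValueError.
def Pre_find_relevant_file_index (file_names : List String) : Prop :=
  ∃ f ∈ file_names, PySem.Str.endswith f "final_data_cc.csv" = true ∨
                    PySem.Str.endswith f "final_data.csv" = true
instance (file_names : List String) : Decidable (Pre_find_relevant_file_index file_names) := by
  unfold Pre_find_relevant_file_index; infer_instance

def pvWitness_find_relevant_file_index : List String := ["notes.txt", "plate_final_data.csv"]

def Spec_find_relevant_file_index (file_names : List String) (out : Int) : Prop := out = find_relevant_file_index_alt file_names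
instance (file_names : List String) (out : Int) : Decidable (Spec_find_relevant_file_index file_names out) := by unfold Spec_find_relevant_file_index; infer_instance

-- ===== CLAIM (what is proved, stated in full; the proofs are below) =====
def Claim_equal_find_relevant_file_index : Prop := ∀ (file_names : List String), Dom_find_relevant_file_index file_names → Pre_find_relevant_file_index file_names → Spec_find_relevant_file_index file_names (find_relevant_file_index file_names)

-- ===== LEMMAS AND PROOFS =====

-- B's single loop equals: first cc match, else the fallback, else the first plain match.
theorem pvBLoop_eq (file_names : List String) : ∀ (i : Int) (fb : Option Int),
    pvBLoop file_names i fb =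
      match pvScanCC file_names i with
      | some j => j
      | none =>
          match fb with
          | some k => k
          | none =>
              match pvScanFD file_names i with
              | some j => j
              | none => 0 := by
  induction file_names with
  | nil => intro i fb; rfl
  | cons f rest ih =>
    intro i fb
    cases fb <;>
      simp only [pvBLoop, pvScanCC, pvScanFD, PySem.Str.endswith_eq, ih, reduceCtorEq,
        false_and, if_false, true_and] <;>
      split_ifs <;>
      simp_all

-- ===== VERDICT (by name: the statement is the Claim_ definition above) =====
theorem find_relevant_file_index_spec : Claim_equal_find_relevant_file_index := by
  intro xs _ _
  unfold Spec_find_relevant_file_index find_relevant_file_index find_relevant_file_index_alt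
  rw [pvBLoop_eq]
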